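-- pv_equiv track=rewrite | github.com/shuizaihuwo/dataset-metawriter-for-cyber | src/dsmeta/nodes/write_outputs.py | _preserve_manual_sections
-- ===== SOURCE A (Python) =====
-- def _preserve_manual_sections(existing_content: str, new_content: str) -> str:
--     """Preserve manually edited sections from existing content."""
--     # Simple implementation - look for manual comment blocks
--     # This could be enhanced with more sophisticated parsing
--
--     manual_start_marker = "<!-- MANUAL_EDIT_START -->"
--     manual_end_marker = "<!-- MANUAL_EDIT_END -->"
--
--     # Extract manual sections from existing content
--     manual_sections = []
--
--     start_idx = 0
--     while True:
--         start_pos = existing_content.find(manual_start_marker, start_idx)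
--         if start_pos == -1:
--             break
--
--         end_pos = existing_content.find(manual_end_marker, start_pos)
--         if end_pos == -1:
--             break
--
--         # Include the markers in the preserved section
--         manual_section = existing_content[start_pos:end_pos + len(manual_end_marker)]
--         manual_sections.append(manual_section)
--
--         start_idx = end_pos + len(manual_end_marker)
--
--     # If no manual sections found, return new content as-is
--     if not manual_sections:
--         return new_content
--
--     # Simple approach: append manual sections at the end
--     result = new_content
--     if manual_sections:
--         result += "\n\n## 手动编辑内容\n\n"
--         for section in manual_sections:
--             result += section + "\n\n"
--
--     return result
-- ===== SOURCE B (Python) =====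
-- def _preserve_manual_sections(existing_content: str, new_content: str) -> str:
--     """Preserve manually edited sections from existing content (single-pass state-machine scan)."""
--     START = "<!-- MANUAL_EDIT_START -->"
--     END = "<!-- MANUAL_EDIT_END -->"
--     sections = []
--     buf = None  # chars of the currently open section (markers included), or None when closed
--     i, n = 0, len(existing_content)
--     while i < n:
--         if buf is None:
--             if existing_content.startswith(START, i):
--                 buf = START
--                 i += len(START)
--             else:
--                 i += 1
--         elif existing_content.startswith(END, i):
--             sections.append(buf + END)
--             buf = None
--             i += len(END)
--         else:
--             buf += existing_content[i]
--             i += 1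
--     if not sections:
--         return new_content
--     parts = [new_content, "\n\n## 手动编辑内容\n\n"]
--     for s in sections:
--         parts.append(s + "\n\n")
--     return "".join(parts)
-- ===== Notes on version B (the rewrite author's own statement) =====
-- stated objective: alternative
-- what changed: Replaced the while-loop of repeated str.find calls (which rescans for each marker) with a single left-to-right character scan driven by a two-state machine (closed: look for a START prefix; open: accumulate until an END prefix), collecting sections in one pass.
import Mathlib
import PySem

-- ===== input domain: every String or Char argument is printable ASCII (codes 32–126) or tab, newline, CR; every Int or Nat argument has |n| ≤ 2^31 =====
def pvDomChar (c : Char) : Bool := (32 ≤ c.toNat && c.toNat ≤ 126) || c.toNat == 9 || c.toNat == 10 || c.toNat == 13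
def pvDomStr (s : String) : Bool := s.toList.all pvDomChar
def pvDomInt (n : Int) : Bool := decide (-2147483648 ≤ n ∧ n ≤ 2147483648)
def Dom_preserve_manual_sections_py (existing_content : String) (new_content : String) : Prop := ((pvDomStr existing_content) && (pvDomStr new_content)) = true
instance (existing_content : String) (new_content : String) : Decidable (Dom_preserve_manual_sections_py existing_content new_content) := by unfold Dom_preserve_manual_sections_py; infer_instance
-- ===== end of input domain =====

-- B replaces A's repeated str.find while-loop by a single left-to-right two-state character scan; objective: alternative (same result, one pass).

-- ===== PORT A =====
def pmsStart : List Char := "<!-- MANUAL_EDIT_START -->".toList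
def pmsEnd : List Char := "<!-- MANUAL_EDIT_END -->".toList
def pmsHeader : List Char := "\n\n## 手动编辑内容\n\n".toList
def pmsNl2 : List Char := "\n\n".toList

-- A's 'while True' loop; the fuel only makes the same computation total (each pass strictly advances start_idx)
def pmsALoop (s : List Char) (startIdx : Int) (acc : List (List Char)) : Nat → List (List Char)
  | 0 => acc
  | Nat.succ fuel =>
      let startPos := PySem.Chars.findFrom s pmsStart startIdx none
      if startPos = -1 then acc
      else
        let endPos := PySem.Chars.findFrom s pmsEnd startPos none
        if endPos = -1 then acc
        else
          let sec := PySem.Chars.slice s (some startPos) (some (endPos + pmsEnd.length))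
          pmsALoop s (endPos + pmsEnd.length) (acc ++ [sec]) fuel

def preserve_manual_sections_py (existing_content : String) (new_content : String) : String :=
  let manual_sections := pmsALoop existing_content.toList 0 [] (existing_content.toList.length + 1)
  if manual_sections = [] then new_content
  else
    let result := new_content.toList
    let result :=
      if manual_sections = [] then result
      else manual_sections.foldl (fun r sec => r ++ (sec ++ pmsNl2)) (result ++ pmsHeader)
    String.ofList result

-- ===== PORT B =====
-- single pass over the characters; buf = some b while a section is open
def pmsBScan : List Char → Option (List Char) → List (List Char) → List (List Char)
  | [], _, acc => acc
  | c :: rest, none, acc =>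
      if PySem.Chars.startswith (c :: rest) pmsStart then
        pmsBScan ((c :: rest).drop pmsStart.length) (some pmsStart) acc
      else pmsBScan rest none acc
  | c :: rest, some buf, acc =>
      if PySem.Chars.startswith (c :: rest) pmsEnd then
        pmsBScan ((c :: rest).drop pmsEnd.length) none (acc ++ [buf ++ pmsEnd])
      else pmsBScan rest (some (buf ++ [c])) acc
  termination_by t _ _ => t.length
  decreasing_by all_goals (simp [pmsStart, pmsEnd]; try omega)

def preserve_manual_sections_py_alt (existing_content : String) (new_content : String) : String :=
  let sections := pmsBScan existing_content.toList none []
  if sections = [] then new_content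
  else
    String.ofList (PySem.Chars.join [] ([new_content.toList, pmsHeader] ++ sections.map (fun s => s ++ pmsNl2)))

-- ===== PRECONDITION & SPEC =====
def Spec_preserve_manual_sections_py (existing_content : String) (new_content : String) (out : String) : Prop := out = preserve_manual_sections_py_alt existing_content new_content
instance (existing_content : String) (new_content : String) (out : String) : Decidable (Spec_preserve_manual_sections_py existing_content new_content out) := by unfold Spec_preserve_manual_sections_py; infer_instance

-- ===== CLAIM (what is proved, stated in full; the proofs are below) =====
def Claim_equal_preserve_manual_sections_py : Prop := ∀ (existing_content : String) (new_content : String), Dom_preserve_manual_sections_py existing_content new_content → Spec_preserve_manual_sections_py existing_content new_content (preserve_manual_sections_py existing_content new_content)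

-- ===== LEMMAS AND PROOFS =====

-- find points at the first occurrence (uniqueness direction of PySem.Chars.find_spec)
theorem find_eq_of_first (s sub : List Char) (p : Nat)
    (h1 : sub <+: s.drop p) (h2 : ∀ i < p, ¬ sub <+: s.drop i) :
    PySem.Chars.find s sub = (p : Int) := by
  have hinf : sub <:+: s := by
    rw [← PySem.Chars.isIn_iff_infix, ← PySem.Chars.exists_prefix_drop_iff_isIn]
    exact ⟨p, h1⟩
  have hnn : 0 ≤ PySem.Chars.find s sub := (PySem.Chars.find_nonneg_iff s sub).mpr hinf
  obtain ⟨hq1, hq2⟩ := PySem.Chars.find_spec hnn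
  set q := (PySem.Chars.find s sub).toNat with hq
  rcases lt_trichotomy p q with h | h | h
  · exact absurd h1 (hq2 p h)
  · omega
  · exact absurd hq1 (h2 q h)

theorem find_not_infix (s sub : List Char) (h : ∀ i, ¬ sub <+: s.drop i) :
    PySem.Chars.find s sub = -1 := by
  rw [PySem.Chars.find_eq_neg_one_iff]
  intro hinf
  rw [← PySem.Chars.isIn_iff_infix, ← PySem.Chars.exists_prefix_drop_iff_isIn] at hinf
  obtain ⟨j, hj⟩ := hinf
  exact h j hj

theorem find_cons_not_prefix (c : Char) (rest sub : List Char)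
    (h : ¬ sub <+: (c :: rest)) :
    PySem.Chars.find (c :: rest) sub =
      (if PySem.Chars.find rest sub = -1 then -1 else PySem.Chars.find rest sub + 1) := by
  by_cases hr : PySem.Chars.find rest sub = -1
  · simp only [hr, if_pos]
    rw [PySem.Chars.find_eq_neg_one_iff] at hr ⊢
    intro hinf
    rw [← PySem.Chars.isIn_iff_infix, ← PySem.Chars.exists_prefix_drop_iff_isIn] at hinf
    obtain ⟨j, hj⟩ := hinf
    cases j with
    | zero => exact h hj
    | succ j' => exact hr (by rw [← PySem.Chars.isIn_iff_infix, ← PySem.Chars.exists_prefix_drop_iff_isIn]; exact ⟨j', hj⟩)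
  · have hnn : 0 ≤ PySem.Chars.find rest sub := by
      have := PySem.Chars.neg_one_le_find rest sub
      omega
    obtain ⟨hq1, hq2⟩ := PySem.Chars.find_spec hnn
    have := find_eq_of_first (c :: rest) sub ((PySem.Chars.find rest sub).toNat + 1)
      (by simpa using hq1)
      (by intro i hi
          cases i with
          | zero => exact h
          | succ i' => exact hq2 i' (by omega))
    rw [this]
    simp only [hr]
    push_cast
    omega

-- no END marker can start inside a START marker occurrence
theorem pms_overlap : ∀ d < pmsStart.length, ¬ (pmsEnd.take (pmsStart.length - d) <+: pmsStart.drop d) := by decide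

theorem pms_noE_in_S (t : List Char) (hS : pmsStart <+: t) :
    ∀ d < pmsStart.length, ¬ pmsEnd <+: t.drop d := by
  intro d hd hE
  obtain ⟨r, hr⟩ := hS
  have hdrop : t.drop d = pmsStart.drop d ++ r := by
    rw [← hr]; exact List.drop_append_of_le_length (by omega)
  rw [hdrop] at hE
  have h1 : pmsEnd.take (pmsStart.drop d).length <+: pmsStart.drop d :=
    (List.isPrefix_append_of_length (by simp [List.length_take])).mp
      ((List.take_prefix (pmsStart.drop d).length pmsEnd).trans hE)
  rw [List.length_drop] at h1
  exact pms_overlap d hd h1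

-- looking for END in u, where u starts with START, is looking for it past the START marker
theorem pms_find_shift (u : List Char) (hS : pmsStart <+: u) :
    PySem.Chars.find u pmsEnd =
      (if PySem.Chars.find (u.drop pmsStart.length) pmsEnd = -1 then -1
       else pmsStart.length + PySem.Chars.find (u.drop pmsStart.length) pmsEnd) := by
  by_cases h : PySem.Chars.find (u.drop pmsStart.length) pmsEnd = -1
  · simp only [h, if_pos]
    apply find_not_infix
    intro i hi
    by_cases hil : i < pmsStart.length
    · exact pms_noE_in_S u hS i hil hi
    · rw [PySem.Chars.find_eq_neg_one_iff] at h
      apply h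
      rw [← PySem.Chars.isIn_iff_infix, ← PySem.Chars.exists_prefix_drop_iff_isIn]
      exact ⟨i - pmsStart.length, by rwa [List.drop_drop, Nat.add_sub_cancel' (by omega)]⟩
  · have hnn : 0 ≤ PySem.Chars.find (u.drop pmsStart.length) pmsEnd := by
      have := PySem.Chars.neg_one_le_find (u.drop pmsStart.length) pmsEnd
      omega
    obtain ⟨hq1, hq2⟩ := PySem.Chars.find_spec hnn
    have := find_eq_of_first u pmsEnd (pmsStart.length + (PySem.Chars.find (u.drop pmsStart.length) pmsEnd).toNat)
      (by rwa [← List.drop_drop])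
      (by intro i hi
          by_cases hil : i < pmsStart.length
          · exact pms_noE_in_S u hS i hil
          · intro hpre
            exact hq2 (i - pmsStart.length) (by omega)
              (by rwa [List.drop_drop, Nat.add_sub_cancel' (by omega)]))
    rw [this]
    simp only [h]
    push_cast
    omega

-- END <+: t.drop q  →  t.take (q + |END|) = t.take q ++ END
theorem take_occ (t sub : List Char) (q : Nat) (h : sub <+: t.drop q) :
    t.take (q + sub.length) = t.take q ++ sub := by
  obtain ⟨r, hr⟩ := h
  rw [List.take_add, ← hr]
  simp

-- closed-state characterisation of B's scan via find
theorem pmsC (t : List Char) (acc : List (List Char)) :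
    pmsBScan t none acc =
      (if PySem.Chars.find t pmsStart = -1 then acc
       else pmsBScan (t.drop ((PySem.Chars.find t pmsStart).toNat + pmsStart.length)) (some pmsStart) acc) := by
  induction t generalizing acc with
  | nil =>
      rw [find_not_infix]
      · simp [pmsBScan]
      · intro i hi
        simp at hi
        simp [pmsStart] at hi
  | cons c rest ih =>
      by_cases hp : pmsStart <+: (c :: rest)
      · rw [find_eq_of_first (c :: rest) pmsStart 0 (by simpa using hp) (by omega), pmsBScan]
        rw [(PySem.Chars.startswith_iff (c :: rest) pmsStart).mpr hp]
        norm_num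
      · have hsw : PySem.Chars.startswith (c :: rest) pmsStart = false := by
          rw [← Bool.not_eq_true, PySem.Chars.startswith_iff]; exact hp
        rw [find_cons_not_prefix c rest pmsStart hp, pmsBScan, hsw]
        simp only [Bool.false_eq_true, if_false]
        rw [ih acc]
        by_cases hr : PySem.Chars.find rest pmsStart = -1
        · simp [hr]
        · have hnn : 0 ≤ PySem.Chars.find rest pmsStart := by
            have := PySem.Chars.neg_one_le_find rest pmsStart
            omega
          simp only [hr, if_false]
          have hne : ¬ (PySem.Chars.find rest pmsStart + 1 = -1) := by omega
          rw [if_neg hne]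
          have harith : (PySem.Chars.find rest pmsStart + 1).toNat + pmsStart.length
              = ((PySem.Chars.find rest pmsStart).toNat + pmsStart.length) + 1 := by omega
          rw [harith, List.drop_succ_cons]

-- open-state characterisation of B's scan via find
theorem pmsO (t : List Char) (buf : List Char) (acc : List (List Char)) :
    pmsBScan t (some buf) acc =
      (if PySem.Chars.find t pmsEnd = -1 then acc
       else pmsBScan (t.drop ((PySem.Chars.find t pmsEnd).toNat + pmsEnd.length)) none
              (acc ++ [buf ++ t.take (PySem.Chars.find t pmsEnd).toNat ++ pmsEnd])) := by
  induction t generalizing buf acc with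
  | nil =>
      rw [find_not_infix]
      · simp [pmsBScan]
      · intro i hi
        simp at hi
        simp [pmsEnd] at hi
  | cons c rest ih =>
      by_cases hp : pmsEnd <+: (c :: rest)
      · rw [find_eq_of_first (c :: rest) pmsEnd 0 (by simpa using hp) (by omega), pmsBScan]
        rw [(PySem.Chars.startswith_iff (c :: rest) pmsEnd).mpr hp]
        norm_num
      · have hsw : PySem.Chars.startswith (c :: rest) pmsEnd = false := by
          rw [← Bool.not_eq_true, PySem.Chars.startswith_iff]; exact hp
        rw [find_cons_not_prefix c rest pmsEnd hp, pmsBScan, hsw]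
        simp only [Bool.false_eq_true, if_false]
        rw [ih (buf ++ [c]) acc]
        by_cases hr : PySem.Chars.find rest pmsEnd = -1
        · simp [hr]
        · have hnn : 0 ≤ PySem.Chars.find rest pmsEnd := by
            have := PySem.Chars.neg_one_le_find rest pmsEnd
            omega
          simp only [hr, if_false]
          have hne : ¬ (PySem.Chars.find rest pmsEnd + 1 = -1) := by omega
          rw [if_neg hne]
          have harith : (PySem.Chars.find rest pmsEnd + 1).toNat + pmsEnd.length
              = ((PySem.Chars.find rest pmsEnd).toNat + pmsEnd.length) + 1 := by omega
          have htk : (PySem.Chars.find rest pmsEnd + 1).toNat = (PySem.Chars.find rest pmsEnd).toNat + 1 := by omega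
          rw [harith, List.drop_succ_cons, htk, List.take_succ_cons]
          simp

-- A's loop, started at k, does what B's scan does on the suffix from k
theorem pms_main : ∀ (fuel : Nat) (s : List Char) (k : Nat) (acc : List (List Char)),
    k ≤ s.length → s.length - k < fuel →
    pmsALoop s (k : Int) acc fuel = pmsBScan (s.drop k) none acc := by
  intro fuel
  induction fuel with
  | zero => intro s k acc hk hf; omega
  | succ fuel ih =>
      intro s k acc hk hf
      rw [pmsALoop]
      rw [PySem.Chars.findFrom_natCast s pmsStart k hk]
      by_cases hfind : PySem.Chars.find (s.drop k) pmsStart = -1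
      · rw [if_pos hfind, if_pos rfl, pmsC, if_pos hfind]
      · rw [if_neg hfind]
        have hnn : 0 ≤ PySem.Chars.find (s.drop k) pmsStart := by
          have := PySem.Chars.neg_one_le_find (s.drop k) pmsStart
          omega
        set p := (PySem.Chars.find (s.drop k) pmsStart).toNat with hpdef
        have hfp : PySem.Chars.find (s.drop k) pmsStart = (p : Int) := by omega
        have hSpre : pmsStart <+: s.drop (k + p) := by
          obtain ⟨hq1, _⟩ := PySem.Chars.find_spec hnn
          rw [List.drop_drop] at hq1
          rwa [← hpdef] at hq1
        have hplen : (p : Int) ≤ (s.drop k).length := by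
          have := PySem.Chars.find_le_length (s.drop k) pmsStart
          omega
        have hkp : k + p ≤ s.length := by
          rw [List.length_drop] at hplen
          omega
        have hne1 : ¬ ((k : Int) + p = -1) := by omega
        rw [hfp, if_neg hne1]
        have hcast : (k : Int) + (p : Int) = ((k + p : Nat) : Int) := by push_cast; ring
        rw [hcast, PySem.Chars.findFrom_natCast s pmsEnd (k + p) hkp]
        rw [pms_find_shift (s.drop (k + p)) hSpre]
        rw [List.drop_drop]
        set t' := s.drop (k + p + pmsStart.length) with ht'
        by_cases hE : PySem.Chars.find t' pmsEnd = -1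
        · rw [if_pos hE, pmsC, if_neg hfind, hfp, Int.toNat_natCast, List.drop_drop, ← Nat.add_assoc, pmsO, ← ht', if_pos hE]
          rfl
        · rw [if_neg hE]
          have hEnn : 0 ≤ PySem.Chars.find t' pmsEnd := by
            have := PySem.Chars.neg_one_le_find t' pmsEnd
            omega
          have hq1 := (PySem.Chars.find_spec hEnn).1
          have hSlen : pmsStart.length = 26 := by decide
          have hElen : pmsEnd.length = 24 := by decide
          set q := (PySem.Chars.find t' pmsEnd).toNat with hqdef
          have hfq : PySem.Chars.find t' pmsEnd = (q : Int) := by omega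
          have hne2 : ¬ ((pmsStart.length : Int) + PySem.Chars.find t' pmsEnd = -1) := by omega
          rw [if_neg hne2]
          have hne3 : ¬ (((k + p : Nat) : Int) + ((pmsStart.length : Int) + PySem.Chars.find t' pmsEnd) = -1) := by omega
          rw [if_neg hne3]
          have hEpre : pmsEnd <+: t'.drop q := hq1
          have hqlen : q + pmsEnd.length ≤ t'.length := by
            have h1 := hEpre.length_le
            rw [List.length_drop] at h1
            have h2 : pmsEnd.length ≤ t'.length - q := h1
            have h3 : q ≤ t'.length := by
              by_contra hc
              rw [List.drop_eq_nil_of_le (by omega)] at hEpre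
              have := hEpre.length_le
              simp [pmsEnd] at this
            omega
          have ht'len : t'.length = s.length - (k + p + pmsStart.length) := by
            rw [ht', List.length_drop]
          set k' := k + p + pmsStart.length + q + pmsEnd.length with hk'def
          have hk's : k' ≤ s.length := by omega
          -- the section A slices out equals the section B accumulated
          have hsec : PySem.Chars.slice s (some (((k + p : Nat) : Int)))
                (some (((k + p : Nat) : Int) + ((pmsStart.length : Int) + PySem.Chars.find t' pmsEnd) + pmsEnd.length))
              = pmsStart ++ t'.take q ++ pmsEnd := by
            rw [hfq]
            have harr : ((k + p : Nat) : Int) + ((pmsStart.length : Int) + (q : Int)) + (pmsEnd.length : Int)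
                = ((k + p : Nat) : Int) + ((pmsStart.length + q + pmsEnd.length : Nat) : Int) := by push_cast; ring
            rw [harr]
            rw [PySem.Chars.slice_eq_listSlice, PySem.List.slice_natCast_add]
            have hu : s.drop (k + p) = pmsStart ++ t' := by
              obtain ⟨r, hrr⟩ := hSpre
              have h2 : t' = (s.drop (k + p)).drop pmsStart.length := by rw [List.drop_drop]
              rw [h2, ← hrr, List.drop_append_of_le_length (by omega)]
              simp
            rw [hu, List.take_append]
            rw [List.take_of_length_le (by omega)]
            have hsub : pmsStart.length + q + pmsEnd.length - pmsStart.length = q + pmsEnd.length := by omega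
            rw [hsub, take_occ t' pmsEnd q hEpre]
            simp
          rw [hsec]
          -- recurse via the induction hypothesis
          have harg : ((k + p : Nat) : Int) + ((pmsStart.length : Int) + PySem.Chars.find t' pmsEnd) + (pmsEnd.length : Int)
              = ((k' : Nat) : Int) := by rw [hfq, hk'def]; push_cast; ring
          rw [harg]
          rw [ih s k' (acc ++ [pmsStart ++ t'.take q ++ pmsEnd]) hk's (by omega)]
          -- B side
          rw [pmsC (s.drop k) acc, if_neg hfind, hfp, Int.toNat_natCast, List.drop_drop, ← Nat.add_assoc, pmsO, ← ht', if_neg hE, hfq, Int.toNat_natCast]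
          rw [List.drop_drop]
          have hfin : k + p + pmsStart.length + (q + pmsEnd.length) = k' := by omega
          rw [hfin]

theorem pms_join_flatten (parts : List (List Char)) :
    PySem.Chars.join [] parts = parts.flatten := by
  show (List.intersperse [] parts).flatten = parts.flatten
  induction parts with
  | nil => simp
  | cons x xs ih => cases xs <;> simp_all

-- ===== VERDICT (by name: the statement is the Claim_ definition above) =====
theorem preserve_manual_sections_py_spec : Claim_equal_preserve_manual_sections_py := by
  intro ec nc _
  unfold Spec_preserve_manual_sections_py
  have hmain := pms_main (ec.toList.length + 1) ec.toList 0 [] (by omega) (by omega)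
  simp only [Nat.cast_zero] at hmain
  rw [List.drop_zero] at hmain
  simp only [preserve_manual_sections_py, preserve_manual_sections_py_alt, hmain]
  by_cases h : pmsBScan ec.toList none [] = []
  · rw [if_pos h, if_pos h]
  · rw [if_neg h, if_neg h, if_neg h]
    congr 1
    rw [pms_join_flatten, PySem.List.foldl_append_eq_flatMap (fun sec => sec ++ pmsNl2)]
    simp [List.flatMap_def]
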